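-- pv_equiv track=rewrite | github.com/youssefm/sparkid | bench_compare.py | _order_names
-- ===== SOURCE A (Python) =====
-- _PREFERRED_ORDER = ["sparkid", "UUID v4", "UUID v7", "nanoid", "ulid", "cuid2"]
--
-- def _order_names(all_names: set[str]) -> list[str]:
--     seen: list[str] = []
--     for n in _PREFERRED_ORDER:
--         if n in all_names:
--             seen.append(n)
--     for n in sorted(all_names - set(seen)):
--         seen.append(n)
--     return seen
-- ===== SOURCE B (Python) =====
-- _PREFERRED_ORDER = ["sparkid", "UUID v4", "UUID v7", "nanoid", "ulid", "cuid2"]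
--
-- _RANK = {n: i for i, n in enumerate(_PREFERRED_ORDER)}
--
--
-- def _order_names(all_names: set[str]) -> list[str]:
--     fallback = len(_PREFERRED_ORDER)
--     return sorted(all_names, key=lambda n: (_RANK.get(n, fallback), n))
-- ===== Notes on version B (the rewrite author's own statement) =====
-- stated objective: simpler
-- what changed: Replaced the two-pass filter-then-sort-remainder construction by one stable keyed sort over a precomputed rank dict, using the key (rank.get(n, len(_PREFERRED_ORDER)), n).
import Mathlib
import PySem

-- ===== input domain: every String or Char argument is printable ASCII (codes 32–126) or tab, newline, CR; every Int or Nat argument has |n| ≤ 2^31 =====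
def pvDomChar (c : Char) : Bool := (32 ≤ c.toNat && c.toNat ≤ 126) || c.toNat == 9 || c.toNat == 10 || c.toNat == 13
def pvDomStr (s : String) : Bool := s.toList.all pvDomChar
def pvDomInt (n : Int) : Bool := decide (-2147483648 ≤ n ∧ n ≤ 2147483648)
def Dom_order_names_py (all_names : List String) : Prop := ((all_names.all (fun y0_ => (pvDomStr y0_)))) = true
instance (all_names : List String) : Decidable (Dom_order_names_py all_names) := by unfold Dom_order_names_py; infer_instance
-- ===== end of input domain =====

-- B replaces A's two passes (filter preferred names, then append the sorted remainder) by a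
-- single stable keyed sort with key (rank of name among the preferred list, name); simpler, not faster.


-- ===== PORT A =====
def pvPreferredOrder : List String := ["sparkid", "UUID v4", "UUID v7", "nanoid", "ulid", "cuid2"]

def order_names_py (all_names : List String) : List String :=
  -- seen = []; for n in _PREFERRED_ORDER: if n in all_names: seen.append(n)
  let seen := pvPreferredOrder.foldl
    (fun acc n => if PySem.Set.contains all_names n then acc ++ [n] else acc) []
  -- for n in sorted(all_names - set(seen)): seen.append(n)
  (PySem.List.sorted (PySem.Set.diff all_names (PySem.Set.ofList seen)) (fun x => x) false).foldl
    (fun acc n => acc ++ [n]) seen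

-- ===== PORT B =====
-- _RANK = {n: i for i, n in enumerate(_PREFERRED_ORDER)}
def pvRank : PySem.Dict String Int :=
  (PySem.List.enumerate pvPreferredOrder 0).foldl
    (fun d p => d.insert p.2 p.1) PySem.Dict.empty

def order_names_py_alt (all_names : List String) : List String :=
  let fallback : Int := (pvPreferredOrder.length : Int)
  PySem.List.sorted2 all_names (fun n => pvRank.getD n fallback) (fun n => n) false

-- ===== PRECONDITION & SPEC =====
-- Pre_ states only the set-representation invariant of the convention (a Python set has no
-- duplicate elements); it excludes no input the Python A accepts.
def Pre_order_names_py (all_names : List String) : Prop := all_names.Nodup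
instance (all_names : List String) : Decidable (Pre_order_names_py all_names) := by
  unfold Pre_order_names_py; infer_instance

def pvWitness_order_names_py : List String := ["ulid", "abc", "sparkid"]

def Spec_order_names_py (all_names : List String) (out : List String) : Prop := out = order_names_py_alt all_names
instance (all_names : List String) (out : List String) : Decidable (Spec_order_names_py all_names out) := by unfold Spec_order_names_py; infer_instance

-- ===== CLAIM (what is proved, stated in full; the proofs are below) =====
def Claim_equal_order_names_py : Prop := ∀ (all_names : List String), Dom_order_names_py all_names → Pre_order_names_py all_names → Spec_order_names_py all_names (order_names_py all_names)

-- ===== LEMMAS AND PROOFS =====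

-- the rank key B sorts by, as a single lexicographic value
def pvKey (n : String) : Lex (Int × String) := toLex (pvRank.getD n 6, n)

theorem pvRank_items :
    pvRank = PySem.Dict.mk [("sparkid", 0), ("UUID v4", 1), ("UUID v7", 2),
      ("nanoid", 3), ("ulid", 4), ("cuid2", 5)] := by rfl

theorem pvRank_not_mem {n : String} (h : n ∉ pvPreferredOrder) :
    pvRank.getD n 6 = 6 := by
  simp only [pvPreferredOrder, List.mem_cons, not_or] at h
  obtain ⟨h1, h2, h3, h4, h5, h6, -⟩ := h
  have e1 : ("sparkid" == n) = false := beq_eq_false_iff_ne.mpr (Ne.symm h1)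
  have e2 : ("UUID v4" == n) = false := beq_eq_false_iff_ne.mpr (Ne.symm h2)
  have e3 : ("UUID v7" == n) = false := beq_eq_false_iff_ne.mpr (Ne.symm h3)
  have e4 : ("nanoid" == n) = false := beq_eq_false_iff_ne.mpr (Ne.symm h4)
  have e5 : ("ulid" == n) = false := beq_eq_false_iff_ne.mpr (Ne.symm h5)
  have e6 : ("cuid2" == n) = false := beq_eq_false_iff_ne.mpr (Ne.symm h6)
  simp [pvRank_items, PySem.Dict.getD, PySem.Dict.get?, List.find?, e1, e2, e3, e4, e5, e6]

theorem pvRank_lt_of_mem {n : String} (h : n ∈ pvPreferredOrder) :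
    pvRank.getD n 6 < 6 := by
  fin_cases h <;> decide

-- B's sorted2 with the pair key equals a plain sort by the lexicographic key
theorem alt_eq_sorted_key (xs : List String) :
    order_names_py_alt xs = PySem.List.sorted xs pvKey false := by
  have hcmp : (fun (a b : String) =>
      (decide (pvRank.getD a 6 < pvRank.getD b 6) ||
        (!decide (pvRank.getD b 6 < pvRank.getD a 6) && decide (a < b))))
      = fun a b => decide (pvKey a < pvKey b) := by
    funext a b
    by_cases h1 : pvRank.getD a 6 < pvRank.getD b 6 <;>
      by_cases h2 : pvRank.getD b 6 < pvRank.getD a 6 <;>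
      by_cases h3 : a < b <;>
      simp [pvKey, Prod.Lex.toLex_lt_toLex, h1, h2, h3] <;> omega
  show List.foldl
      (fun acc x => PySem.List.insertBy
        (fun a b => (decide (pvRank.getD a 6 < pvRank.getD b 6) ||
          (!decide (pvRank.getD b 6 < pvRank.getD a 6) && decide (a < b)))) x acc) [] xs
      = PySem.List.sorted xs pvKey false
  rw [hcmp, PySem.List.sorted_eq_foldl_insertBy]

theorem order_names_py_spec' (xs : List String) (hnd : xs.Nodup) :
    order_names_py xs = order_names_py_alt xs := by
  rw [alt_eq_sorted_key]
  unfold order_names_py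
  rw [PySem.List.foldl_append_if_eq_filter, List.nil_append,
      PySem.List.foldl_append_singleton_eq_map (fun n => n), List.map_id']
  set P := pvPreferredOrder.filter (fun n => PySem.Set.contains xs n) with hP
  set D := PySem.Set.diff xs (PySem.Set.ofList P) with hD
  set S := PySem.List.sorted D (fun x => x) false with hS
  -- memberships
  have hmemP : ∀ y, y ∈ P ↔ y ∈ pvPreferredOrder ∧ y ∈ xs := by
    intro y
    simp [hP, List.mem_filter]
  have hmemS : ∀ y, y ∈ S ↔ y ∈ xs ∧ y ∉ P := by
    intro y
    rw [hS, PySem.List.mem_sorted, hD, PySem.Set.mem_diff, PySem.Set.mem_ofList]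
  have hSnotpref : ∀ y ∈ S, y ∉ pvPreferredOrder := by
    intro y hy hyp
    rcases (hmemS y).1 hy with ⟨hyx, hynP⟩
    exact hynP ((hmemP y).2 ⟨hyp, hyx⟩)
  -- nodup
  have hprefnd : pvPreferredOrder.Nodup := by decide
  have hPnd : P.Nodup := hprefnd.filter _
  have hSnd : S.Nodup := ((PySem.List.sorted_perm D (fun x => x) false).nodup_iff).2
    (PySem.Set.nodup_diff _ _ hnd)
  have hTnd : (P ++ S).Nodup := by
    rw [List.nodup_append]
    refine ⟨hPnd, hSnd, ?_⟩
    intro y hyP z hzS heq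
    exact ((hmemS y).1 (heq ▸ hzS)).2 hyP
  -- permutation
  have hperm : (P ++ S).Perm xs := by
    rw [List.perm_ext_iff_of_nodup hTnd hnd]
    intro y
    rw [List.mem_append, hmemP, hmemS]
    constructor
    · rintro (⟨-, h⟩ | ⟨h, -⟩) <;> exact h
    · intro hy
      by_cases hp : y ∈ P
      · exact Or.inl ((hmemP y).1 hp)
      · exact Or.inr ⟨hy, hp⟩
  -- pairwise strict key order
  have hPpw : P.Pairwise (fun a b => pvKey a < pvKey b) := by
    have h0 : pvPreferredOrder.Pairwise (fun a b => pvRank.getD a 6 < pvRank.getD b 6) := by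
      decide
    exact (h0.filter _).imp (fun h => by
      simp only [pvKey, Prod.Lex.toLex_lt_toLex]; exact Or.inl h)
  have hSpw : S.Pairwise (fun a b => pvKey a < pvKey b) := by
    have hle : S.Pairwise (fun a b => a ≤ b) := PySem.List.sorted_pairwise D (fun x => x)
    have hlt : S.Pairwise (fun a b => a < b) :=
      (hSnd.and hle).imp (fun ⟨hne, hle⟩ => lt_of_le_of_ne hle hne)
    exact hlt.imp_of_mem (fun {a b} ha hb h => by
      simp only [pvKey, Prod.Lex.toLex_lt_toLex,
        pvRank_not_mem (hSnotpref a ha), pvRank_not_mem (hSnotpref b hb)]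
      tauto)
  have hpw : (P ++ S).Pairwise (fun a b => pvKey a < pvKey b) := by
    rw [List.pairwise_append]
    refine ⟨hPpw, hSpw, fun p hp s hs => ?_⟩
    have h1 : pvRank.getD p 6 < 6 := pvRank_lt_of_mem ((hmemP p).1 hp).1
    have h2 : pvRank.getD s 6 = 6 := pvRank_not_mem (hSnotpref s hs)
    simp only [pvKey, Prod.Lex.toLex_lt_toLex]
    exact Or.inl (by omega)
  exact (PySem.List.sorted_eq_of_perm_of_pairwise_lt xs (P ++ S) pvKey hperm hpw).symm

-- ===== VERDICT (by name: the statement is the Claim_ definition above) =====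
theorem order_names_py_spec : Claim_equal_order_names_py := by
  intro xs _ hpre
  exact order_names_py_spec' xs hpre
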